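-- pv_equiv track=rewrite | github.com/eBLDR/Pali-Vocab | palivocab/utils.py | generate_shortcut_mapper
-- ===== SOURCE A (Python) =====
-- def generate_shortcut_mapper(terms):
--     shortcut_mapper = {}
--     characters = 1
--
--     while not shortcut_mapper:
--
--         for term in terms:
--             shortcut = term[:characters]
--             shortcut_mapper[shortcut] = term
--
--         if len(shortcut_mapper.keys()) != len(terms):
--             characters += 1
--             shortcut_mapper.clear()
--
--     return shortcut_mapper, characters
-- ===== SOURCE B (Python) =====
-- def generate_shortcut_mapper(terms):
--     # Uniqueness of length-k prefixes is monotone in k, so binary-search the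
--     # minimal k instead of trying k = 1, 2, 3, ... and rebuilding the dict each time.
--     def distinct(k):
--         prefixes = [term[:k] for term in terms]
--         return len(set(prefixes)) == len(prefixes)
--
--     lo, hi = 1, max(len(term) for term in terms)
--     while lo < hi:
--         mid = (lo + hi) // 2
--         if distinct(mid):
--             hi = mid
--         else:
--             lo = mid + 1
--
--     return {term[:lo]: term for term in terms}, lo
-- ===== Notes on version B (the rewrite author's own statement) =====
-- stated objective: faster
-- what changed: A tries prefix lengths 1,2,3,... rebuilding the whole dict at every length until the prefixes are unique; B binary-searches the minimal length (uniqueness of length-k prefixes is monotone in k) and builds the map once.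
import Mathlib
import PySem

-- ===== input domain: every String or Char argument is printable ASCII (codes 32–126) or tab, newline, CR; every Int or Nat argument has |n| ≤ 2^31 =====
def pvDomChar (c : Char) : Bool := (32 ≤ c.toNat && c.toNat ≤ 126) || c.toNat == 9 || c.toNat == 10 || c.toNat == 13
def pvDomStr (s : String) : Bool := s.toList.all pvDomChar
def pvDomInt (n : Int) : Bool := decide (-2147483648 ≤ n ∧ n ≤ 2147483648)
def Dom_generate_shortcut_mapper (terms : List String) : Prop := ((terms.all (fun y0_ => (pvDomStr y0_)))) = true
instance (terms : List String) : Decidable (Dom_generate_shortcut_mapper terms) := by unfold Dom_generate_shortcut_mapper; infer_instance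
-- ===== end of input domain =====

-- B replaces A's linear try-every-length dict-rebuild loop by a binary search for the
-- minimal unique-prefix length (uniqueness is monotone in the length), building the map once.

-- ===== PORT A =====
-- the for-loop of one iteration of A's while loop: fill the dict with length-c prefixes
def pvFillA (terms : List String) (characters : Int) : PySem.Dict String String :=
  terms.foldl (fun d term => d.insert (PySem.Str.slice term none (some characters)) term)
    PySem.Dict.empty

-- A's 'while not shortcut_mapper' loop; the fuel only makes it total (A diverges on
-- duplicate or empty terms, which Pre_ excludes; on Pre_ the fuel is never exhausted)
def pvLoopA (terms : List String) (characters : Int) : Nat → (List (String × String)) × Int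
  | 0 => ([], characters)
  | fuel + 1 =>
    if (pvFillA terms characters).keys.length ≠ terms.length then
      pvLoopA terms (characters + 1) fuel
    else if (pvFillA terms characters).items.isEmpty then
      pvLoopA terms characters fuel
    else ((pvFillA terms characters).items, characters)

def generate_shortcut_mapper (terms : List String) : (List (String × String)) × Int :=
  let fuel := match PySem.List.max? (terms.map (fun t => (PySem.Str.len t : Int))) (fun x => x) with
    | none => 0
    | some m => m.toNat + 1
  pvLoopA terms 1 fuel

-- ===== PORT B =====
-- Source B's 'distinct(k)': are the length-k prefixes pairwise distinct?
def pvDistinctB (terms : List String) (k : Int) : Bool :=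
  let prefixes := terms.map (fun term => PySem.Str.slice term none (some k))
  (PySem.Set.ofList prefixes).length == prefixes.length

-- Source B's binary-search while loop
def pvSearchB (terms : List String) (lo hi : Int) : Int :=
  if h : lo < hi then
    if pvDistinctB terms (PySem.Int.floordiv (lo + hi) 2) then
      pvSearchB terms lo (PySem.Int.floordiv (lo + hi) 2)
    else
      pvSearchB terms (PySem.Int.floordiv (lo + hi) 2 + 1) hi
  else lo
termination_by (hi - lo).toNat
decreasing_by
  · have h1 := (PySem.Int.le_floordiv_iff_mul_le (a := lo + hi) (b := 2) (q := lo) (by omega)).mpr (by omega)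
    have h2 := (PySem.Int.floordiv_lt_iff_lt_mul (a := lo + hi) (b := 2) (q := hi) (by omega)).mpr (by omega)
    omega
  · have h1 := (PySem.Int.le_floordiv_iff_mul_le (a := lo + hi) (b := 2) (q := lo) (by omega)).mpr (by omega)
    have h2 := (PySem.Int.floordiv_lt_iff_lt_mul (a := lo + hi) (b := 2) (q := hi) (by omega)).mpr (by omega)
    omega

def generate_shortcut_mapper_alt (terms : List String) : (List (String × String)) × Int :=
  match PySem.List.max? (terms.map (fun t => (PySem.Str.len t : Int))) (fun x => x) with
  | none => ([], 1)  -- max() raises ValueError on empty terms; excluded by Pre_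
  | some hi =>
    let lo := pvSearchB terms 1 hi
    ((terms.foldl (fun d term => d.insert (PySem.Str.slice term none (some lo)) term)
        PySem.Dict.empty).items, lo)

-- ===== PRECONDITION & SPEC =====
-- A loops forever on empty terms (the dict stays empty) and on duplicate terms (no prefix
-- length separates them), never returning; Pre_ excludes exactly those inputs.
def Pre_generate_shortcut_mapper (terms : List String) : Prop := terms ≠ [] ∧ terms.Nodup
instance (terms : List String) : Decidable (Pre_generate_shortcut_mapper terms) := by
  unfold Pre_generate_shortcut_mapper; infer_instance

def pvWitness_generate_shortcut_mapper : List String := ["apple", "ant", "bee"]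

def Spec_generate_shortcut_mapper (terms : List String) (out : (List (String × String)) × Int) : Prop := out = generate_shortcut_mapper_alt terms
instance (terms : List String) (out : (List (String × String)) × Int) : Decidable (Spec_generate_shortcut_mapper terms out) := by unfold Spec_generate_shortcut_mapper; infer_instance

-- ===== CLAIM (what is proved, stated in full; the proofs are below) =====
def Claim_equal_generate_shortcut_mapper : Prop := ∀ (terms : List String), Dom_generate_shortcut_mapper terms → Pre_generate_shortcut_mapper terms → Spec_generate_shortcut_mapper terms (generate_shortcut_mapper terms)

-- ===== LEMMAS AND PROOFS =====

-- the length-c prefixes of the terms, and 'they are pairwise distinct'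
def pvPrefs (terms : List String) (c : Int) : List String :=
  terms.map (fun t => PySem.Str.slice t none (some c))

def pvGood (terms : List String) (c : Int) : Prop := (pvPrefs terms c).Nodup

theorem pvToList_pref (t : String) (c : Int) (hc : 0 ≤ c) :
    (PySem.Str.slice t none (some c)).toList = t.toList.take c.toNat := by
  simp [PySem.List.slice_to _ hc]

theorem pvStr_ext {s t : String} (h : s.toList = t.toList) : s = t := by
  have := congrArg String.ofList h
  simpa using this

theorem pvOfListLen (xs : List String) :
    (PySem.Set.ofList xs).length = xs.length ↔ xs.Nodup := by
  constructor
  · intro h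
    have hn : (PySem.Set.ofList xs).Nodup := PySem.Set.nodup_ofList xs
    have h1 : (PySem.Set.ofList xs).toFinset = xs.toFinset := by
      ext a; simp [PySem.Set.mem_ofList]
    have h2 : (PySem.Set.ofList xs).toFinset.card = (PySem.Set.ofList xs).length :=
      List.toFinset_card_of_nodup hn
    have h3 : xs.toFinset.card = xs.dedup.length := xs.card_toFinset
    have h4 : xs.dedup.length = xs.length := by rw [← h3, ← h1, h2, h]
    have h5 : xs.dedup = xs := (xs.dedup_sublist).eq_of_length h4
    rw [← h5]; exact xs.nodup_dedup
  · intro h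
    rw [PySem.Set.ofList_eq_self_of_nodup xs h]

theorem pvDistinct_iff (terms : List String) (c : Int) :
    pvDistinctB terms c = true ↔ pvGood terms c := by
  simp only [pvDistinctB, pvGood, pvPrefs, beq_iff_eq]
  exact pvOfListLen _

theorem pvFillA_keys (terms : List String) (c : Int) :
    (pvFillA terms c).keys = PySem.Set.ofList (pvPrefs terms c) := by
  unfold pvFillA pvPrefs
  rw [PySem.Dict.keys_foldl_insert_key]
  rfl

theorem pvCond_iff (terms : List String) (c : Int) :
    ((pvFillA terms c).keys.length ≠ terms.length) ↔ ¬ pvGood terms c := by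
  apply not_congr
  rw [pvFillA_keys]
  rw [show terms.length = (pvPrefs terms c).length by simp [pvPrefs]]
  exact pvOfListLen _

theorem pvGood_mono (terms : List String) {j m : Int} (hj : 0 ≤ j) (hjm : j ≤ m)
    (h : pvGood terms j) : pvGood terms m := by
  have hmap : pvPrefs terms j
      = (pvPrefs terms m).map (fun s => PySem.Str.slice s none (some j)) := by
    unfold pvPrefs
    rw [List.map_map]
    apply List.map_congr_left
    intro t _
    apply pvStr_ext
    rw [pvToList_pref _ _ hj]
    show _ = (PySem.Str.slice (PySem.Str.slice t none (some m)) none (some j)).toList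
    rw [pvToList_pref _ _ hj, pvToList_pref _ _ (by omega), List.take_take]
    congr 1
    omega
  unfold pvGood at h ⊢
  rw [hmap] at h
  exact h.of_map

theorem pvGood_top (terms : List String) (hnd : terms.Nodup) (c : Int) (hc0 : 0 ≤ c)
    (hc : ∀ t ∈ terms, t.toList.length ≤ c.toNat) : pvGood terms c := by
  have : pvPrefs terms c = terms := by
    unfold pvPrefs
    rw [show terms = terms.map id from (List.map_id terms).symm]
    rw [List.map_map]
    apply List.map_congr_left
    intro t ht
    apply pvStr_ext
    simp only [Function.comp, id]
    rw [pvToList_pref _ _ hc0]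
    exact List.take_of_length_le (by simpa using hc t (by simpa using ht))
  unfold pvGood
  rw [this]
  exact hnd

theorem pvLoopA_spec (terms : List String) (hne : terms ≠ []) (k : Int)
    (hgood : pvGood terms k) :
    ∀ (fuel : Nat) (c : Int), c ≤ k → k < c + fuel →
      (∀ j, c ≤ j → j < k → ¬ pvGood terms j) →
      pvLoopA terms c fuel = ((pvFillA terms k).items, k) := by
  intro fuel
  induction fuel with
  | zero => intro c h1 h2 _; exfalso; omega
  | succ fuel ih =>
    intro c h1 h2 hbelow
    by_cases hck : c = k
    · subst hck
      have hcond : ¬ ((pvFillA terms c).keys.length ≠ terms.length) := by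
        rw [pvCond_iff]; exact not_not_intro hgood
      have hlen : (pvFillA terms c).keys.length = terms.length := not_ne_iff.mp hcond
      have hItems : ¬ ((pvFillA terms c).items.isEmpty = true) := by
        intro hemp
        rw [List.isEmpty_iff] at hemp
        have : (pvFillA terms c).keys.length = 0 := by
          simp only [PySem.Dict.keys, hemp]; rfl
        rw [hlen] at this
        exact hne (List.length_eq_zero_iff.mp this)
      rw [pvLoopA, if_neg hcond, if_neg hItems]
    · have hck' : c < k := lt_of_le_of_ne h1 hck
      have hbad : ¬ pvGood terms c := hbelow c le_rfl hck'
      rw [pvLoopA, if_pos ((pvCond_iff terms c).mpr hbad)]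
      exact ih (c + 1) (by omega) (by omega) (fun j hj1 hj2 => hbelow j (by omega) hj2)

theorem pvMidBounds {lo hi : Int} (h : lo < hi) :
    lo ≤ PySem.Int.floordiv (lo + hi) 2 ∧ PySem.Int.floordiv (lo + hi) 2 < hi := by
  constructor
  · exact (PySem.Int.le_floordiv_iff_mul_le (a := lo + hi) (b := 2) (q := lo) (by omega)).mpr (by omega)
  · exact (PySem.Int.floordiv_lt_iff_lt_mul (a := lo + hi) (b := 2) (q := hi) (by omega)).mpr (by omega)

theorem pvSearchB_spec (terms : List String) (k : Int) (hk0 : 1 ≤ k)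
    (hgood : pvGood terms k) (hbelow : ∀ j, 1 ≤ j → j < k → ¬ pvGood terms j) :
    ∀ (n : Nat) (lo hi : Int), (hi - lo).toNat = n → 1 ≤ lo → lo ≤ k → k ≤ hi →
      pvSearchB terms lo hi = k := by
  intro n
  induction n using Nat.strong_induction_on with
  | _ n ih =>
    intro lo hi hn hlo1 hlok hkhi
    rw [pvSearchB]
    by_cases h : lo < hi
    · rw [dif_pos h]
      obtain ⟨hmid1, hmid2⟩ := pvMidBounds h
      by_cases hd : pvDistinctB terms (PySem.Int.floordiv (lo + hi) 2) = true
      · rw [if_pos hd]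
        have hgm : pvGood terms (PySem.Int.floordiv (lo + hi) 2) := (pvDistinct_iff _ _).mp hd
        have hkm : k ≤ PySem.Int.floordiv (lo + hi) 2 := by
          by_contra hlt
          push_neg at hlt
          exact hbelow _ (by omega) hlt hgm
        exact ih (PySem.Int.floordiv (lo + hi) 2 - lo).toNat (by omega) lo _ rfl hlo1 hlok hkm
      · rw [if_neg hd]
        have hnm : ¬ pvGood terms (PySem.Int.floordiv (lo + hi) 2) :=
          fun hg => hd ((pvDistinct_iff _ _).mpr hg)
        have hmk : PySem.Int.floordiv (lo + hi) 2 < k := by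
          by_contra hge
          push_neg at hge
          exact hnm (pvGood_mono terms (by omega) hge hgood)
        exact ih (hi - (PySem.Int.floordiv (lo + hi) 2 + 1)).toNat (by omega) _ hi rfl
          (by omega) (by omega) hkhi
    · rw [dif_neg h]; omega

theorem pvLen_toList (t : String) : (PySem.Str.len t : Int) = (t.toList.length : Int) := by
  simp [PySem.Str.len]

-- ===== VERDICT (by name: the statement is the Claim_ definition above) =====
theorem generate_shortcut_mapper_spec : Claim_equal_generate_shortcut_mapper := by
  intro terms _ hpre
  obtain ⟨hne, hnd⟩ := hpre
  unfold Spec_generate_shortcut_mapper generate_shortcut_mapper generate_shortcut_mapper_alt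
  cases hmax : PySem.List.max? (terms.map (fun t => (PySem.Str.len t : Int))) (fun x => x) with
  | none =>
    exfalso
    rw [PySem.List.max?_eq_none_iff] at hmax
    exact hne (by simpa using hmax)
  | some m =>
    -- facts about the maximum length m
    have hmem : m ∈ terms.map (fun t => (PySem.Str.len t : Int)) := PySem.List.max?_mem hmax
    have hm0 : 0 ≤ m := by
      simp only [List.mem_map] at hmem
      obtain ⟨t, _, ht⟩ := hmem
      rw [← ht, pvLen_toList]
      positivity
    have hmaxall : ∀ t ∈ terms, (t.toList.length : Int) ≤ m := by
      intro t ht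
      have := PySem.List.max?_isMax hmax ((PySem.Str.len t : Int)) (List.mem_map_of_mem ht)
      rw [pvLen_toList] at this
      exact this
    -- the least good prefix length k
    have hinh : ∃ z : Int, 1 ≤ z ∧ pvGood terms z := by
      refine ⟨max m 1, le_max_right _ _, pvGood_top terms hnd _ (by omega) ?_⟩
      intro t ht
      have := hmaxall t ht
      omega
    have hbdd : ∃ b : Int, ∀ z : Int, (1 ≤ z ∧ pvGood terms z) → b ≤ z := ⟨1, fun z hz => hz.1⟩
    haveI : DecidablePred (fun z : Int => 1 ≤ z ∧ pvGood terms z) :=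
      Classical.decPred _
    obtain ⟨k, ⟨hk1, hkg⟩, hkmin⟩ := Int.exists_least_of_bdd hbdd hinh
    have hbelow : ∀ j, 1 ≤ j → j < k → ¬ pvGood terms j := by
      intro j hj1 hjk hjg
      exact absurd (hkmin j ⟨hj1, hjg⟩) (by omega)
    have hgmax : pvGood terms (max m 1) := by
      apply pvGood_top terms hnd _ (by omega)
      intro t ht
      have := hmaxall t ht
      omega
    have hktop : k ≤ max m 1 := hkmin _ ⟨le_max_right _ _, hgmax⟩
    -- A's side
    have hA : pvLoopA terms 1 (m.toNat + 1) = ((pvFillA terms k).items, k) := by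
      apply pvLoopA_spec terms hne k hkg (m.toNat + 1) 1 hk1 (by omega) hbelow
    -- B's side
    have hB : pvSearchB terms 1 m = k := by
      by_cases hm1 : 1 ≤ m
      · have hgm : pvGood terms m := by
          apply pvGood_top terms hnd
          · omega
          · intro t ht
            have := hmaxall t ht
            omega
        have hkm : k ≤ m := hkmin m ⟨hm1, hgm⟩
        exact pvSearchB_spec terms k hk1 hkg hbelow (m - 1).toNat 1 m rfl le_rfl hk1 hkm
      · -- m = 0: all terms are empty strings; k = 1 and the search returns lo = 1 at once
        have hm : m = 0 := by omega
        have hg1 : pvGood terms 1 := by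
          apply pvGood_top terms hnd
          · omega
          · intro t ht
            have := hmaxall t ht
            omega
        have : k ≤ 1 := hkmin 1 ⟨le_rfl, hg1⟩
        have hk : k = 1 := by omega
        rw [pvSearchB, dif_neg (by omega), hk]
    simp only [hA, hB]
    rfl
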